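-- pv_equiv track=rewrite | github.com/rreichman/PokerMaster | pokerMaster.py | getWinnerGroups
-- ===== SOURCE A (Python) =====
-- def getWinnerGroups(winners):
--     winner_groups = []
--     winners_sorted_by_pot_size = sorted(winners, key=lambda x: x[1])
--
--     current_winner_pot_size = winners_sorted_by_pot_size[0][1]
--     current_group = [winners_sorted_by_pot_size[0]]
--     for j in range(len(winners_sorted_by_pot_size) - 1):
--         i = j + 1
--         if winners_sorted_by_pot_size[i][1] == current_winner_pot_size:
--             current_group.append(winners_sorted_by_pot_size[i])
--         else:
--             winner_groups.append(current_group)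
--             current_group = [winners_sorted_by_pot_size[i]]
--     winner_groups.append(current_group)
--
--     return winner_groups
-- ===== SOURCE B (Python) =====
-- def getWinnerGroups(winners):
--     # One group of all winners sharing the minimal pot size, then each remaining
--     # winner alone (A's loop never updates current_winner_pot_size, so this is
--     # exactly the grouping it produces).
--     s = sorted(winners, key=lambda x: x[1])
--     first_pot = s[0][1]
--     k = sum(1 for w in s if w[1] == first_pot)
--     return [s[:k]] + [[w] for w in s[k:]]
-- ===== Notes on version B (the rewrite author's own statement) =====
-- stated objective: simpler
-- what changed: Replaces A's running current-group/stale-key loop with a closed-form construction: since A never updates current_winner_pot_size, its output is always the block of minimal-pot-size winners followed by one singleton per remaining winner, and B builds exactly that from a count and two slices of the sorted list.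
import Mathlib
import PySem

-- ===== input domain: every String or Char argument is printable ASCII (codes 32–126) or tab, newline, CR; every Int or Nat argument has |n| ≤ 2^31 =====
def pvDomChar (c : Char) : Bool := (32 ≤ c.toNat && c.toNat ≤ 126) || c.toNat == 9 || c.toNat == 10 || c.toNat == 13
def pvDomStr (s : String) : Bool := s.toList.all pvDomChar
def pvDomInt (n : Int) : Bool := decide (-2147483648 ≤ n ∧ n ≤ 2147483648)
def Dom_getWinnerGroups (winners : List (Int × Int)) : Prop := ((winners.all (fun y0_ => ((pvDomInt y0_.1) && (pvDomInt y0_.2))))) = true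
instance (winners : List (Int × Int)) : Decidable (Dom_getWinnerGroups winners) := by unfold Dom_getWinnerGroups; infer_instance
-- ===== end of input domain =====

-- B replaces A's running current-group loop with a closed form of the same output: since A's
-- loop never updates `current_winner_pot_size`, its result is always one group of all
-- minimal-pot-size winners followed by a singleton per remaining winner, which B builds
-- directly from two slices of the sorted list (objective: simpler).

-- ===== PORT A =====
def getWinnerGroups (winners : List (Int × Int)) : List (List (Int × Int)) :=
  let winner_groups : List (List (Int × Int)) := []
  let winners_sorted_by_pot_size := PySem.List.sorted winners (fun x => x.2) false
  let current_winner_pot_size := (PySem.List.pyGetD winners_sorted_by_pot_size 0 (0, 0)).2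
  let current_group := [PySem.List.pyGetD winners_sorted_by_pot_size 0 (0, 0)]
  let st := (PySem.List.pyRange 0 ((winners_sorted_by_pot_size.length : Int) - 1)).foldl
    (fun (st : List (List (Int × Int)) × Int × List (Int × Int)) j =>
      let i := j + 1
      if (PySem.List.pyGetD winners_sorted_by_pot_size i (0, 0)).2 == st.2.1 then
        (st.1, st.2.1, st.2.2 ++ [PySem.List.pyGetD winners_sorted_by_pot_size i (0, 0)])
      else
        (st.1 ++ [st.2.2], st.2.1, [PySem.List.pyGetD winners_sorted_by_pot_size i (0, 0)]))
    (winner_groups, current_winner_pot_size, current_group)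
  st.1 ++ [st.2.2]

-- ===== PORT B =====
def getWinnerGroups_alt (winners : List (Int × Int)) : List (List (Int × Int)) :=
  let s := PySem.List.sorted winners (fun x => x.2) false
  let first_pot := (PySem.List.pyGetD s 0 (0, 0)).2
  let k := s.foldl (fun acc w => if w.2 == first_pot then acc + 1 else acc) (0 : Int)
  [PySem.List.slice s none (some k)] ++ (PySem.List.slice s (some k) none).map (fun w => [w])

-- ===== PRECONDITION & SPEC =====
-- Pre_ excludes only the empty list, on which both A and B raise IndexError (s[0]).
def Pre_getWinnerGroups (winners : List (Int × Int)) : Prop := winners ≠ []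
instance (winners : List (Int × Int)) : Decidable (Pre_getWinnerGroups winners) := by unfold Pre_getWinnerGroups; infer_instance
def pvWitness_getWinnerGroups : (List (Int × Int)) := [(1, 2)]

def Spec_getWinnerGroups (winners : List (Int × Int)) (out : List (List (Int × Int))) : Prop := out = getWinnerGroups_alt winners
instance (winners : List (Int × Int)) (out : List (List (Int × Int))) : Decidable (Spec_getWinnerGroups winners out) := by
  unfold Spec_getWinnerGroups; infer_instance

-- ===== CLAIM (what is proved, stated in full; the proofs are below) =====
def Claim_equal_getWinnerGroups : Prop := ∀ (winners : List (Int × Int)), Dom_getWinnerGroups winners → Pre_getWinnerGroups winners → Spec_getWinnerGroups winners (getWinnerGroups winners)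

-- ===== LEMMAS AND PROOFS =====

-- A's loop body with the indexed element already fetched.
def pvStepA (st : List (List (Int × Int)) × Int × List (Int × Int)) (y : Int × Int) :
    List (List (Int × Int)) × Int × List (Int × Int) :=
  if y.2 == st.2.1 then (st.1, st.2.1, st.2.2 ++ [y])
  else (st.1 ++ [st.2.2], st.2.1, [y])

lemma pv_foldl_shift {α β : Type} (s : List α) (dflt : α) (F : β → α → β) (init : β) :
    (PySem.List.pyRange 0 ((s.length : Int) - 1)).foldl
      (fun st j => F st (PySem.List.pyGetD s (j+1) dflt)) init
    = (s.drop 1).foldl F init := by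
  have h1 := PySem.List.foldl_pyRange_pyGetD s dflt F init (a := 1) (by norm_num)
  have h2 : List.drop (Int.toNat 1) s = s.drop 1 := by norm_num
  rw [h2] at h1
  rw [← h1, PySem.List.pyRange_one, PySem.List.pyRange_one, List.foldl_map, List.foldl_map]
  have hn : ((s.length : Int) - 1 - 0).toNat = ((PySem.List.len s) - 1).toNat := by
    simp [PySem.List.len_eq]
  rw [hn]
  congr 1
  funext st k
  have h3 : (0:Int) + (k:Int) + 1 = 1 + (k:Int) := by omega
  rw [h3]

lemma pv_A_eq (winners : List (Int × Int)) (x : Int × Int) (xs : List (Int × Int))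
    (h : PySem.List.sorted winners (fun x => x.2) false = x :: xs) :
    getWinnerGroups winners
      = (xs.foldl pvStepA ([], x.2, [x])).1 ++ [(xs.foldl pvStepA ([], x.2, [x])).2.2] := by
  unfold getWinnerGroups
  simp only [h]
  have hfun : (fun (st : List (List (Int × Int)) × Int × List (Int × Int)) (j : Int) =>
      if ((PySem.List.pyGetD (x :: xs) (j + 1) (0, 0)).2 == st.2.1) = true then
        (st.1, st.2.1, st.2.2 ++ [PySem.List.pyGetD (x :: xs) (j + 1) (0, 0)])
      else (st.1 ++ [st.2.2], st.2.1, [PySem.List.pyGetD (x :: xs) (j + 1) (0, 0)]))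
      = (fun st j => pvStepA st (PySem.List.pyGetD (x :: xs) (j + 1) (0, 0))) := rfl
  rw [hfun, pv_foldl_shift (x :: xs) (0, 0) pvStepA]
  simp [PySem.List.pyGetD]

-- fold over a run of elements whose pot equals the current one: they join the group
lemma pv_eq_run (cur0 : Int) (t : List (Int × Int)) :
    ∀ (gs : List (List (Int × Int))) (grp : List (Int × Int)),
    (∀ y ∈ t, y.2 = cur0) →
    t.foldl pvStepA (gs, cur0, grp) = (gs, cur0, grp ++ t) := by
  induction t with
  | nil => intro gs grp _; simp
  | cons y ys ih =>
    intro gs grp hall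
    have hy : y.2 = cur0 := hall y (by simp)
    simp only [List.foldl_cons]
    have : pvStepA (gs, cur0, grp) y = (gs, cur0, grp ++ [y]) := by simp [pvStepA, hy]
    rw [this, ih gs (grp ++ [y]) (fun z hz => hall z (by simp [hz]))]
    simp

-- fold over elements whose pot differs from the stale current one: each is a singleton
lemma pv_ne_run (cur0 : Int) (r : List (Int × Int)) :
    ∀ (gs : List (List (Int × Int))) (grp : List (Int × Int)),
    (∀ y ∈ r, y.2 ≠ cur0) →
    (r.foldl pvStepA (gs, cur0, grp)).1 ++ [(r.foldl pvStepA (gs, cur0, grp)).2.2]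
      = gs ++ [grp] ++ r.map (fun w => [w]) := by
  induction r with
  | nil => intro gs grp _; simp
  | cons y ys ih =>
    intro gs grp hall
    have hy : y.2 ≠ cur0 := hall y (by simp)
    simp only [List.foldl_cons]
    have : pvStepA (gs, cur0, grp) y = (gs ++ [grp], cur0, [y]) := by simp [pvStepA, hy]
    rw [this, ih (gs ++ [grp]) [y] (fun z hz => hall z (by simp [hz]))]
    simp

-- in a sorted list, everything after the leading minimal-pot run has a different pot
lemma pv_drop_ne (c : Int) (xs : List (Int × Int)) :
    (∀ y ∈ xs, c ≤ y.2) → xs.Pairwise (fun a b => a.2 ≤ b.2) →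
    ∀ z ∈ xs.dropWhile (fun y => y.2 == c), z.2 ≠ c := by
  induction xs with
  | nil => intro _ _ z hz; simp at hz
  | cons y ys ih =>
    intro hge hpw z hz
    by_cases hy : y.2 = c
    · rw [List.dropWhile_cons_of_pos (by simp [hy])] at hz
      exact ih (fun w hw => hge w (by simp [hw])) (List.Pairwise.of_cons hpw) z hz
    · rw [List.dropWhile_cons_of_neg (by simp [hy])] at hz
      have hyc : c < y.2 := lt_of_le_of_ne (hge y (by simp)) (Ne.symm hy)
      rcases List.mem_cons.mp hz with h | h
      · subst h; omega
      · have := (List.pairwise_cons.mp hpw).1 z h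
        omega

-- ===== VERDICT (by name: the statement is the Claim_ definition above) =====
theorem getWinnerGroups_spec : Claim_equal_getWinnerGroups := by
  intro winners _ hpre
  show getWinnerGroups winners = getWinnerGroups_alt winners
  have hperm := PySem.List.sorted_perm winners (fun w : Int × Int => w.2) false
  have hp := PySem.List.sorted_pairwise winners (fun w : Int × Int => w.2)
  obtain ⟨x, xs, h⟩ : ∃ x xs, PySem.List.sorted winners (fun w : Int × Int => w.2) false = x :: xs := by
    cases hc : PySem.List.sorted winners (fun w : Int × Int => w.2) false with
    | nil =>
      exfalso; apply hpre
      rw [hc] at hperm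
      exact hperm.symm.eq_nil
    | cons a l => exact ⟨a, l, rfl⟩
  rw [h] at hp
  have hhead : ∀ y ∈ xs, x.2 ≤ y.2 := (List.pairwise_cons.mp hp).1
  have htail : xs.Pairwise (fun a b => a.2 ≤ b.2) := (List.pairwise_cons.mp hp).2
  -- split xs into the equal-pot run and the rest
  have hsplit : xs.takeWhile (fun y => y.2 == x.2) ++ xs.dropWhile (fun y => y.2 == x.2) = xs :=
    List.takeWhile_append_dropWhile
  set t := xs.takeWhile (fun y => y.2 == x.2) with ht
  set r := xs.dropWhile (fun y => y.2 == x.2) with hr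
  have htall : ∀ y ∈ t, y.2 = x.2 := by
    intro y hy
    have := List.mem_takeWhile_imp (ht ▸ hy)
    simpa using this
  have hrall : ∀ z ∈ r, z.2 ≠ x.2 := by
    intro z hz
    exact pv_drop_ne x.2 xs hhead htail z (hr ▸ hz)
  -- A's side
  rw [pv_A_eq winners x xs h, ← hsplit, List.foldl_append,
    pv_eq_run x.2 t [] [x] htall, pv_ne_run x.2 r [] ([x] ++ t) hrall]
  -- B's side
  unfold getWinnerGroups_alt
  simp only [h]
  have hget : PySem.List.pyGetD (x :: xs) 0 (0, 0) = x := by simp [PySem.List.pyGetD]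
  rw [hget]
  have hk : (x :: xs).foldl (fun acc w => if w.2 == x.2 then acc + 1 else acc) (0 : Int)
      = ((t.length + 1 : Nat) : Int) := by
    rw [PySem.List.foldl_count_if (fun w => w.2 == x.2) (x :: xs) 0]
    have hc : List.countP (fun w => w.2 == x.2) (x :: xs) = t.length + 1 := by
      rw [List.countP_cons, ← hsplit, List.countP_append]
      have h1 : List.countP (fun y => y.2 == x.2) t = t.length :=
        List.countP_eq_length.mpr (fun a ha => by simp [htall a ha])
      have h2 : List.countP (fun y => y.2 == x.2) r = 0 :=
        List.countP_eq_zero.mpr (fun a ha => by simpa using hrall a ha)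
      rw [h1, h2]
      simp
    rw [hc]; push_cast; ring
  rw [hk]
  have hnn : (0:Int) ≤ ((t.length + 1 : Nat) : Int) := by positivity
  rw [PySem.List.slice_to _ hnn, PySem.List.slice_from _ hnn]
  have htoNat : (((t.length + 1 : Nat) : Int)).toNat = t.length + 1 := by omega
  rw [htoNat]
  have htake : (x :: xs).take (t.length + 1) = x :: t := by
    rw [← hsplit]
    show (x :: (t ++ r)).take (t.length + 1) = x :: t
    simp [List.take_succ_cons]
  have hdrop : (x :: xs).drop (t.length + 1) = r := by
    rw [← hsplit]
    show (x :: (t ++ r)).drop (t.length + 1) = r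
    simp [List.drop_succ_cons]
  rw [htake, hdrop]
  simp
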